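-- pv_equiv track=rewrite | github.com/nunnu1028/kerorogame-decryptor | decrypt.py | crypt_packet
-- ===== SOURCE A (Python) =====
-- public_key = [155, 61, 100, 92, 135, 18, 250, 175, 149, 63, 99, 83, 55, 114, 250, 207]
--
-- current_private_key = public_key
--
-- def get_key():
--     key = []
--
--     for i in range(16):
--         key.append(current_private_key[i] ^ public_key[i])
--
--     return key
--
-- def crypt_packet(data: bytearray):
--     result = list(data)
--
--     A = -99 * len(data)
--     B = 2157
--     key = get_key()
--
--     for i in range(len(data)):
--         result[i] = (data[i] ^ (A & 0xFF) ^ ((B >> 8) & 0xFF) ^ key[i & 0xF]) & 0xFF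
--         B *= 2171
--
--     return result
-- ===== SOURCE B (Python) =====
-- public_key = [155, 61, 100, 92, 135, 18, 250, 175, 149, 63, 99, 83, 55, 114, 250, 207]
--
-- current_private_key = public_key
--
-- def crypt_packet(data):
--     # Stateless closed form: the i-th keystream word is 2157 * 2171**i (mod 2**16),
--     # computed per index with modular exponentiation — no loop-carried product at all,
--     # so each output byte is independent of the others (random access / parallelizable).
--     n = len(data)
--     a = (-99 * n) & 0xFF
--     key = [current_private_key[i] ^ public_key[i] for i in range(16)]
--     return [(data[i] ^ a ^ (((2157 * pow(2171, i, 65536)) % 65536) >> 8) ^ key[i % 16]) & 0xFF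
--             for i in range(n)]
-- ===== Notes on version B (the rewrite author's own statement) =====
-- stated objective: faster
-- what changed: B replaces A's sequential loop-carried keystream (an ever-growing bignum product B *= 2171) by a stateless closed form: the i-th keystream word is 2157*2171^i mod 2^16, computed independently per index with modular exponentiation pow(2171, i, 65536), so the output is a plain comprehension with no accumulator.
import Mathlib
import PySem

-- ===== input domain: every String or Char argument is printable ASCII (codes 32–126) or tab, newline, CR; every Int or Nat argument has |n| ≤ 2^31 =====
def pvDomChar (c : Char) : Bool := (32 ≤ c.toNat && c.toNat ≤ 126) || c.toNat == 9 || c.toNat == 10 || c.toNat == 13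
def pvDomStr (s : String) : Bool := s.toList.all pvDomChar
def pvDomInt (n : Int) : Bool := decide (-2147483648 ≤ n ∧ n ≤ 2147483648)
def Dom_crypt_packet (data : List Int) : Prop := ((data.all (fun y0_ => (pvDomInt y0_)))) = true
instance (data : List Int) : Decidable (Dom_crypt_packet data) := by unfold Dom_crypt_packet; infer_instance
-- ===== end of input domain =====

set_option maxRecDepth 4000


-- B computes the i-th keystream word by the closed form 2157*2171^i mod 2^16 (modular
-- exponentiation per index) instead of A's loop-carried ever-growing product; same return value.

-- ===== PORT A =====
def public_key_port : List Int := [155, 61, 100, 92, 135, 18, 250, 175, 149, 63, 99, 83, 55, 114, 250, 207]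

def current_private_key_port : List Int := public_key_port

-- get_key(): loop appending current_private_key[i] ^ public_key[i] (index always in range, so pyGetD is exact)
def get_key_port : List Int :=
  (PySem.List.pyRange 0 16 1).foldl
    (fun key i =>
      key ++ [PySem.Int.bxor (PySem.List.pyGetD current_private_key_port i 0)
                             (PySem.List.pyGetD public_key_port i 0)]) []

-- crypt_packet: result = list(data); for i in range(len(data)): result[i] = …; B *= 2171
-- (i from range(len(data)) is a valid nonnegative index, so result[i] = … is result.set i.toNat …, exact)
def crypt_packet (data : List Int) : List Int :=
  let result := data
  let A : Int := -99 * (data.length : Int)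
  let key := get_key_port
  ((PySem.List.pyRange 0 (data.length : Int) 1).foldl
    (fun (st : List Int × Int) i =>
      (st.1.set i.toNat
        (PySem.Int.band
          (PySem.Int.bxor
            (PySem.Int.bxor
              (PySem.Int.bxor (PySem.List.pyGetD data i 0) (PySem.Int.band A 255))
              (PySem.Int.band (st.2 >>> (8:Nat)) 255))
            (PySem.List.pyGetD key (PySem.Int.band i 15) 0))
          255),
       st.2 * 2171))
    (result, 2157)).1

-- ===== PORT B =====
-- Source B: a = (-99*n) & 0xFF; key by comprehension; one comprehension over range(n) whose
-- keystream word is pow(2171, i, 65536) (PySem.Int.powMod), no loop-carried state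
def crypt_packet_alt (data : List Int) : List Int :=
  let n : Int := (data.length : Int)
  let a := PySem.Int.band (-99 * n) 255
  let key := (PySem.List.pyRange 0 16 1).map
    (fun i => PySem.Int.bxor (PySem.List.pyGetD current_private_key_port i 0)
                             (PySem.List.pyGetD public_key_port i 0))
  (PySem.List.pyRange 0 n 1).map
    (fun i =>
      PySem.Int.band
        (PySem.Int.bxor
          (PySem.Int.bxor
            (PySem.Int.bxor (PySem.List.pyGetD data i 0) a)
            ((PySem.Int.mod (2157 * PySem.Int.powMod 2171 i.toNat 65536) 65536) >>> (8:Nat)))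
          (PySem.List.pyGetD key (PySem.Int.mod i 16) 0))
        255)

-- ===== PRECONDITION & SPEC =====
def Spec_crypt_packet (data : List Int) (out : List Int) : Prop := out = crypt_packet_alt data
instance (data : List Int) (out : List Int) : Decidable (Spec_crypt_packet data out) := by unfold Spec_crypt_packet; infer_instance

-- ===== CLAIM (what is proved, stated in full; the proofs are below) =====
def Claim_equal_crypt_packet : Prop := ∀ (data : List Int), Dom_crypt_packet data → Spec_crypt_packet data (crypt_packet data)

-- ===== LEMMAS AND PROOFS =====

-- the per-byte expression of port A (i : index, B : A's keystream value, d : data[i])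
def pvFA (a : Int) (key : List Int) (i B d : Int) : Int :=
  PySem.Int.band
    (PySem.Int.bxor
      (PySem.Int.bxor (PySem.Int.bxor d a) (PySem.Int.band (B >>> (8:Nat)) 255))
      (PySem.List.pyGetD key (PySem.Int.band i 15) 0))
    255

-- the per-byte expression of port B (stateless: index i only)
def pvFB (a : Int) (key : List Int) (i d : Int) : Int :=
  PySem.Int.band
    (PySem.Int.bxor
      (PySem.Int.bxor (PySem.Int.bxor d a)
        ((PySem.Int.mod (2157 * PySem.Int.powMod 2171 i.toNat 65536) 65536) >>> (8:Nat)))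
      (PySem.List.pyGetD key (PySem.Int.mod i 16) 0))
    255

-- reference unrolling of A's loop over the remaining suffix l = data.drop j
def pvBuildA (a : Int) (key : List Int) : List Int → Nat → Int → List Int
  | [], _, _ => []
  | d :: l, j, B => pvFA a key (j : Int) B d :: pvBuildA a key l (j+1) (B * 2171)

theorem pv_and_255 (n : Nat) : n &&& 255 = n % 256 := by
  have := Nat.and_two_pow_sub_one_eq_mod n 8; norm_num at this; exact this

theorem pv_and_15 (n : Nat) : n &&& 15 = n % 16 := by
  have := Nat.and_two_pow_sub_one_eq_mod n 4; norm_num at this; exact this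

theorem pv_shr_8 (n : Nat) : n >>> 8 = n / 256 := by
  have := Nat.shiftRight_eq_div_pow n 8; norm_num at this; exact this

theorem pv_cast_shr (m : Nat) : ((m:Int) >>> (8:Nat)) = ((m >>> 8 : Nat) : Int) := by
  simp [Int.shiftRight_eq, Int.natCast_shiftRight]

-- the closed form: bits 8-15 of 2157*2171^j equal B's per-index keystream byte
theorem pv_nat_hi (n : Nat) : (n >>> 8) &&& 255 = (n % 65536) >>> 8 := by
  rw [pv_and_255, pv_shr_8, pv_shr_8]
  omega

theorem pv_keystream (j : Nat) :
    PySem.Int.band (((2157:Int) * 2171 ^ j) >>> (8:Nat)) 255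
      = (PySem.Int.mod (2157 * PySem.Int.powMod 2171 j 65536) 65536) >>> (8:Nat) := by
  have hpm : PySem.Int.powMod 2171 j 65536 = (((2171 ^ j % 65536 : Nat)) : Int) := by
    rw [PySem.Int.powMod_eq_emod 2171 j (by norm_num)]
    push_cast
    rfl
  rw [hpm,
      show ((2157:Int) * ((2171 ^ j % 65536 : Nat) : Int)) = (((2157 * (2171 ^ j % 65536) : Nat)) : Int) from by push_cast; ring,
      show ((2157:Int) * 2171 ^ j) = (((2157 * 2171 ^ j : Nat)) : Int) from by push_cast; ring,
      pv_cast_shr, show (255:Int) = ((255:Nat):Int) from rfl, PySem.Int.band_natCast,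
      show PySem.Int.mod (((2157 * (2171 ^ j % 65536) : Nat)) : Int) 65536
            = (((2157 * (2171 ^ j % 65536)) % 65536 : Nat) : Int) from
        by exact_mod_cast PySem.Int.mod_natCast (2157 * (2171 ^ j % 65536)) 65536,
      pv_cast_shr]
  refine congrArg (Nat.cast : Nat → Int) ?_
  have hm : (2157 * (2171 ^ j % 65536)) % 65536 = (2157 * 2171 ^ j) % 65536 := by
    conv_rhs => rw [Nat.mul_mod]
  rw [hm]
  exact pv_nat_hi _

-- A's key index i & 15 is B's i % 16 on the loop indices (nonnegative)
theorem pv_idx (j : Nat) : PySem.Int.band (j : Int) 15 = PySem.Int.mod (j : Int) 16 := by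
  rw [show (15:Int) = ((15:Nat):Int) from rfl, PySem.Int.band_natCast,
      show (16:Int) = ((16:Nat):Int) from rfl, PySem.Int.mod_natCast, pv_and_15]

theorem pv_set_append (out : List Int) (d v : Int) (l : List Int) :
    (out ++ d :: l).set out.length v = out ++ v :: l := by
  induction out with
  | nil => rfl
  | cons x xs ih => simp [ih]

-- A's loop characterized by the reference unrolling
theorem pv_A_loop (data : List Int) (a : Int) (key : List Int) :
    ∀ (l out : List Int) (j : Nat) (B : Int),
      data.drop j = l → out.length = j →
      ((PySem.List.pyRange (j : Int) (data.length : Int) 1).foldl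
        (fun (st : List Int × Int) i =>
          (st.1.set i.toNat (pvFA a key i st.2 (PySem.List.pyGetD data i 0)), st.2 * 2171))
        (out ++ l, B)).1 = out ++ pvBuildA a key l j B := by
  intro l
  induction l with
  | nil =>
    intro out j B hdrop _
    have hj : (data.length : Int) ≤ (j : Int) := by
      exact_mod_cast List.drop_eq_nil_iff.mp hdrop
    rw [PySem.List.pyRange_one_eq_nil hj]
    simp [pvBuildA]
  | cons d l ih =>
    intro out j B hdrop hlen
    subst hlen
    have hjlt : out.length < data.length := by
      by_contra h
      rw [List.drop_eq_nil_of_le (by omega)] at hdrop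
      simp at hdrop
    have hd : PySem.List.pyGetD data (out.length : Int) 0 = d := by
      rw [PySem.List.pyGetD_natCast]
      have h1 : data[out.length]? = some d := by
        rw [← List.head?_drop, hdrop]; rfl
      simp [List.getD, h1]
    have hdrop' : data.drop (out.length + 1) = l := by
      rw [← List.tail_drop, hdrop]; rfl
    rw [PySem.List.pyRange_one_cons (by exact_mod_cast hjlt)]
    simp only [List.foldl_cons, Int.toNat_natCast, hd]
    rw [pv_set_append,
        show ((out.length:Int) + 1) = ((out.length + 1 : Nat) : Int) from by push_cast; ring,
        show out ++ pvFA a key (out.length:Int) B d :: l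
             = (out ++ [pvFA a key (out.length:Int) B d]) ++ l from by simp]
    rw [ih (out ++ [pvFA a key (out.length:Int) B d]) (out.length + 1) (B * 2171) hdrop' (by simp)]
    simp [pvBuildA]

-- the unrolled A-loop on the suffix from j, seeded with 2157*2171^j, is B's stateless map
theorem pv_buildA_eq_map (a : Int) (key : List Int) (data : List Int) :
    ∀ (l : List Int) (j : Nat), data.drop j = l →
      pvBuildA a key l j ((2157:Int) * 2171 ^ j)
        = (PySem.List.pyRange (j : Int) (data.length : Int) 1).map
            (fun i => pvFB a key i (PySem.List.pyGetD data i 0)) := by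
  intro l
  induction l with
  | nil =>
    intro j hdrop
    have hj : (data.length : Int) ≤ (j : Int) := by
      exact_mod_cast List.drop_eq_nil_iff.mp hdrop
    rw [PySem.List.pyRange_one_eq_nil hj]
    rfl
  | cons d l ih =>
    intro j hdrop
    have hjlt : j < data.length := by
      by_contra h
      rw [List.drop_eq_nil_of_le (by omega)] at hdrop
      simp at hdrop
    have hd : PySem.List.pyGetD data (j : Int) 0 = d := by
      rw [PySem.List.pyGetD_natCast]
      have h1 : data[j]? = some d := by
        rw [← List.head?_drop, hdrop]; rfl
      simp [List.getD, h1]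
    have hdrop' : data.drop (j + 1) = l := by
      rw [← List.tail_drop, hdrop]; rfl
    rw [PySem.List.pyRange_one_cons (by exact_mod_cast hjlt)]
    simp only [List.map_cons]
    have hhead : pvFA a key (j:Int) ((2157:Int) * 2171 ^ j) d
        = pvFB a key (j:Int) (PySem.List.pyGetD data (j:Int) 0) := by
      rw [hd]
      unfold pvFA pvFB
      rw [pv_keystream j, pv_idx j, Int.toNat_natCast]
    have htail := ih (j + 1) hdrop'
    simp only [pvBuildA]
    rw [show ((2157:Int) * 2171 ^ j * 2171) = (2157:Int) * 2171 ^ (j+1) from by ring,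
        hhead, show ((j:Int) + 1) = ((j + 1 : Nat) : Int) from by push_cast; ring, htail]

-- ===== VERDICT (by name: the statement is the Claim_ definition above) =====
theorem crypt_packet_spec : Claim_equal_crypt_packet := by
  unfold Claim_equal_crypt_packet Spec_crypt_packet
  intro data _
  have hkey : (PySem.List.pyRange 0 16 1).map
      (fun i => PySem.Int.bxor (PySem.List.pyGetD current_private_key_port i 0)
                               (PySem.List.pyGetD public_key_port i 0)) = get_key_port := by decide
  have hA : crypt_packet data =
      pvBuildA (PySem.Int.band (-99 * (data.length : Int)) 255) get_key_port data 0 2157 := by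
    have := pv_A_loop data (PySem.Int.band (-99 * (data.length : Int)) 255) get_key_port
      data [] 0 2157 rfl rfl
    simpa [pvFA] using this
  have hB : crypt_packet_alt data =
      (PySem.List.pyRange 0 (data.length : Int) 1).map
        (fun i => pvFB (PySem.Int.band (-99 * (data.length : Int)) 255) get_key_port i
                        (PySem.List.pyGetD data i 0)) := by
    unfold crypt_packet_alt
    rw [hkey]
    simp [pvFB]
  rw [hA, hB]
  have := pv_buildA_eq_map (PySem.Int.band (-99 * (data.length : Int)) 255) get_key_port data data 0 rfl
  simpa using this
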